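-- pv_equiv track=rewrite | github.com/ajh011/chgcnn | datafunc_new.py | hetero_rel_edges
-- ===== SOURCE A (Python) =====
-- def ordertype(hgraph, string):
--     order_hedge = []
--     for hedge in hgraph:
--         if hedge[0] == string:
--             order_hedge.append(hedge)
--     return order_hedge
--
-- def decompose(hgraph, order_types=['atom','bond','motif']):
--     sep = []
--     for string in order_types:
--         sep.append(ordertype(hgraph, string))
--     return sep
--
-- def contains(big, small):
--     if all(item in big for item in small):
--         return True
--     else:
--         return False
--
-- def touches(one, two):
--     if any(item in one for item in two):
--         return True
--     else:
--         return False
--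
-- def hetero_rel_edges(hgraph, cell_vector = True):
--     atoms, bonds, motifs = decompose(hgraph)
--     edges = {}
--     atom_atom_hom = [[],[]]
--     for bond in bonds:
--         atom_atom_hom[0].append(bond[2][0])
--         atom_atom_hom[1].append(bond[2][1])
--     edges['atom','bonds','atom'] = atom_atom_hom
--
--     atom_bonds_het = [[],[]]
--     for atom in atoms:
--         for bond in bonds:
--             if contains(bond[2],atom[2]):
--                 atom_bonds_het[0].append(atom[1])
--                 atom_bonds_het[1].append(bond[1])
--     edges['atom','in','bond'] = atom_bonds_het
--
--     atom_motifs_het = [[],[]]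
--     for atom in atoms:
--         for motif in motifs:
--             if contains(motif[2],atom[2]):
--                 atom_motifs_het[0].append(atom[1])
--                 atom_motifs_het[1].append(motif[1])
--     edges['atom','in','motif'] = atom_motifs_het
--
--     bond_bond_hom = [[],[]]
--     for bond1 in bonds:
--         for bond2 in bonds:
--             if bond1!=bond2:
--                 if touches(bond1[2], bond2[2]):
--                     bond_bond_hom[0].append(bond1[1])
--                     bond_bond_hom[1].append(bond2[1])
--
--     edges['bond','touches','bond'] = bond_bond_hom
--
--
--     bond_motifs_het = [[],[]]
--     for bond in bonds:
--         for motif in motifs: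
--             if contains(motif[2],bond[2]):
--                 bond_motifs_het[0].append(bond[1])
--                 bond_motifs_het[1].append(motif[1])
--     edges['bond','in','motif'] = bond_motifs_het
--
--     mot_mot_hom = [[],[]]
--     for m1 in motifs:
--         for m2 in motifs:
--             if m1!=m2:
--                 if touches(m1, m2):
--                     mot_mot_hom[0].append(m1[1])
--                     mot_mot_hom[1].append(m2[1])
--
--     edges['motif','touches','motif'] = mot_mot_hom
--
--     if cell_vector == True:
--         orders = ['motif', 'atom', 'bond']
--         for string, order in zip(orders, decompose(hgraph, orders)):
--             edge_idx = [[],[]]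
--             for ent in order:
--                 edge_idx[0].append(0)
--                 edge_idx[1].append(ent[1])
--             edges['cell', 'contains', string] = edge_idx
--
--     return edges
-- ===== SOURCE B (Python) =====
-- # B: one-pass partition + inverted element->entity-index postings (sorted, dup-free by
-- # construction); containment and shared-element adjacency are read off the index, and each
-- # relation is built as a pair list then transposed; A's motif-motif touches(m1, m2) tests
-- # membership in the 3-tuples themselves, which always holds, so B links every distinct
-- # motif pair directly.
-- def hetero_rel_edges(hgraph, cell_vector=True):
--     atoms  = [h for h in hgraph if h[0] == 'atom']
--     bonds  = [h for h in hgraph if h[0] == 'bond']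
--     motifs = [h for h in hgraph if h[0] == 'motif']
--
--     def index_of(entities):
--         idx = {}
--         for j, ent in enumerate(entities):
--             for e in ent[2]:
--                 p = idx.setdefault(e, [])
--                 if not p or p[-1] != j:
--                     p.append(j)
--         return idx  # element -> strictly increasing entity indices
--
--     bidx, midx = index_of(bonds), index_of(motifs)
--
--     def cols(pairs):
--         return [[p[0] for p in pairs], [p[1] for p in pairs]]
--
--     def inside(smalls, bigs, idx):
--         return cols([(s[1], bigs[j][1])
--                      for s in smalls
--                      for j in (idx.get(s[2][0], []) if s[2] else range(len(bigs)))
--                      if all(e in bigs[j][2] for e in s[2])])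
--
--     touches_bb = cols([(b[1], bonds[j][1])
--                        for b in bonds
--                        for j in sorted({j for e in b[2] for j in bidx.get(e, [])})
--                        if bonds[j] != b])
--
--     edges = {
--         ('atom', 'bonds', 'atom'): cols([(b[2][0], b[2][1]) for b in bonds]),
--         ('atom', 'in', 'bond'): inside(atoms, bonds, bidx),
--         ('atom', 'in', 'motif'): inside(atoms, motifs, midx),
--         ('bond', 'touches', 'bond'): touches_bb,
--         ('bond', 'in', 'motif'): inside(bonds, motifs, midx),
--         ('motif', 'touches', 'motif'):
--             cols([(m1[1], m2[1]) for m1 in motifs for m2 in motifs if m2 != m1]),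
--     }
--     if cell_vector == True:
--         for s, o in (('motif', motifs), ('atom', atoms), ('bond', bonds)):
--             edges['cell', 'contains', s] = [[0] * len(o), [e[1] for e in o]]
--     return edges
-- ===== Notes on version B (the rewrite author's own statement) =====
-- stated objective: alternative
-- what changed: B partitions the hypergraph once and builds an inverted element-to-entity-index whose postings are strictly increasing by construction; containment ('atom/bond in bond/motif') probes only the posting list of the first member and 'bond touches bond' unions posting lists, instead of A's all-pairs nested scans; each relation is assembled as a pair list that is transposed at the end rather than A's parallel in-place appends, and A's vacuously-true motif-motif touches test is emitted as every distinct motif pair directly.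
import Mathlib
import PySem

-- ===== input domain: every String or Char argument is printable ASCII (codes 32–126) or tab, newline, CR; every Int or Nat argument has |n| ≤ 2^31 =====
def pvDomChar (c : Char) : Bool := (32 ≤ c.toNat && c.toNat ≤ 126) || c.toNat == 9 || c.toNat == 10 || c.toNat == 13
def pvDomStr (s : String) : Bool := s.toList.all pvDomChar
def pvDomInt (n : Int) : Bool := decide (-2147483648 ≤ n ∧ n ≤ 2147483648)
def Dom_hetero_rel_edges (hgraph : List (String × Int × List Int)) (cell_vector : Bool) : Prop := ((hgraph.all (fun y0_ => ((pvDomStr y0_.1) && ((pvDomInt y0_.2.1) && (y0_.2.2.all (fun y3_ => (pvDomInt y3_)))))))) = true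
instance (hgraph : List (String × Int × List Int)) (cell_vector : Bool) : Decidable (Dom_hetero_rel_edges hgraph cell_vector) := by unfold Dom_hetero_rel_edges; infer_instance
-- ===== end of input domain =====

-- B replaces A's all-pairs containment/adjacency scans by an inverted element→entity index
-- wired into comprehension-style pair lists; the equivalence is about the return value.

abbrev pvEnt : Type := String × Int × List Int

-- ===== PORT A =====
def pvOrdertype (hgraph : List pvEnt) (s : String) : List pvEnt :=
  hgraph.foldl (fun acc hedge => if hedge.1 == s then acc ++ [hedge] else acc) []

def pvDecompose (hgraph : List pvEnt) (orderTypes : List String) : List (List pvEnt) :=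
  orderTypes.foldl (fun sep s => sep ++ [pvOrdertype hgraph s]) []

def pvContains (big small : List Int) : Bool := small.all (fun item => big.contains item)

def pvTouches (one two : List Int) : Bool := two.any (fun item => one.contains item)

-- A calls touches(m1, m2) on the 3-tuples themselves; 'item in tuple' can only match the
-- component of item's own type (Python's cross-type == is False on str/int/list here)
def pvTouchesT (one two : pvEnt) : Bool :=
  (two.1 == one.1) || (two.2.1 == one.2.1) || (two.2.2 == one.2.2)

-- bond[2][0] / bond[2][1] raise IndexError when a bond has < 2 members; Pre_ excludes that,
-- so the pyGetD defaults below are never read on admitted inputs.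
def hetero_rel_edges (hgraph : List pvEnt) (cell_vector : Bool) :
    List (String × String × String × List (List Int)) :=
  match pvDecompose hgraph ["atom", "bond", "motif"] with
  | [atoms, bonds, motifs] =>
    let edges : PySem.Dict (String × String × String) (List (List Int)) := PySem.Dict.empty
    let aah := bonds.foldl (fun (ac : List Int × List Int) bond =>
        (ac.1 ++ [PySem.List.pyGetD bond.2.2 0 0], ac.2 ++ [PySem.List.pyGetD bond.2.2 1 0])) ([], [])
    let edges := edges.insert ("atom", "bonds", "atom") [aah.1, aah.2]
    let abh := atoms.foldl (fun ac atom => bonds.foldl (fun (ac : List Int × List Int) bond =>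
        if pvContains bond.2.2 atom.2.2 then (ac.1 ++ [atom.2.1], ac.2 ++ [bond.2.1]) else ac) ac) ([], [])
    let edges := edges.insert ("atom", "in", "bond") [abh.1, abh.2]
    let amh := atoms.foldl (fun ac atom => motifs.foldl (fun (ac : List Int × List Int) motif =>
        if pvContains motif.2.2 atom.2.2 then (ac.1 ++ [atom.2.1], ac.2 ++ [motif.2.1]) else ac) ac) ([], [])
    let edges := edges.insert ("atom", "in", "motif") [amh.1, amh.2]
    let bbh := bonds.foldl (fun ac bond1 => bonds.foldl (fun (ac : List Int × List Int) bond2 =>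
        if bond1 != bond2 then
          (if pvTouches bond1.2.2 bond2.2.2 then (ac.1 ++ [bond1.2.1], ac.2 ++ [bond2.2.1]) else ac)
        else ac) ac) ([], [])
    let edges := edges.insert ("bond", "touches", "bond") [bbh.1, bbh.2]
    let bmh := bonds.foldl (fun ac bond => motifs.foldl (fun (ac : List Int × List Int) motif =>
        if pvContains motif.2.2 bond.2.2 then (ac.1 ++ [bond.2.1], ac.2 ++ [motif.2.1]) else ac) ac) ([], [])
    let edges := edges.insert ("bond", "in", "motif") [bmh.1, bmh.2]
    let mmh := motifs.foldl (fun ac m1 => motifs.foldl (fun (ac : List Int × List Int) m2 =>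
        if m1 != m2 then
          (if pvTouchesT m1 m2 then (ac.1 ++ [m1.2.1], ac.2 ++ [m2.2.1]) else ac)
        else ac) ac) ([], [])
    let edges := edges.insert ("motif", "touches", "motif") [mmh.1, mmh.2]
    let edges := if cell_vector == true then
        (List.zip ["motif", "atom", "bond"] (pvDecompose hgraph ["motif", "atom", "bond"])).foldl
          (fun ed so =>
            let ei := so.2.foldl (fun (ac : List Int × List Int) ent =>
                (ac.1 ++ [(0 : Int)], ac.2 ++ [ent.2.1])) ([], [])
            ed.insert ("cell", "contains", so.1) [ei.1, ei.2]) edges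
      else edges
    edges.items.map (fun p => (p.1.1, p.1.2.1, p.1.2.2, p.2))
  | _ => []  -- unreachable: decompose over three order types always yields three lists

-- ===== PORT B =====
-- element → entity indices; a posting list stays strictly increasing because an index j is
-- appended only when the current last entry differs from j (indices arrive nondecreasing)
def pvIndexOf (entities : List pvEnt) : PySem.Dict Int (List Int) :=
  (PySem.List.enumerate entities 0).foldl (fun idx je =>
    je.2.2.2.foldl (fun idx e =>
      idx.modify e [] (fun p => if p.getLast? == some je.1 then p else p ++ [je.1])) idx)
    PySem.Dict.empty

def pvCols (pairs : List (Int × Int)) : List (List Int) :=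
  [pairs.map (fun p => p.1), pairs.map (fun p => p.2)]

def pvInside (smalls bigs : List pvEnt) (idx : PySem.Dict Int (List Int)) : List (List Int) :=
  pvCols (smalls.flatMap (fun s =>
    ((match s.2.2 with
      | [] => PySem.List.pyRange 0 bigs.length 1
      | e0 :: _ => idx.getD e0 []).filter
        (fun j => s.2.2.all (fun e => (PySem.List.pyGetD bigs j ("", 0, [])).2.2.contains e))).map
      (fun j => (s.2.1, (PySem.List.pyGetD bigs j ("", 0, [])).2.1))))

def hetero_rel_edges_alt (hgraph : List pvEnt) (cell_vector : Bool) :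
    List (String × String × String × List (List Int)) :=
  let atoms := hgraph.filter (fun h => h.1 == "atom")
  let bonds := hgraph.filter (fun h => h.1 == "bond")
  let motifs := hgraph.filter (fun h => h.1 == "motif")
  let bidx := pvIndexOf bonds
  let midx := pvIndexOf motifs
  let touches_bb := pvCols (bonds.flatMap (fun b =>
    ((PySem.List.sorted
        ((PySem.Set.ofList (b.2.2.flatMap (fun e => bidx.getD e [])) : PySem.Set Int) : List Int)
        (fun x => x)).filter
      (fun j => PySem.List.pyGetD bonds j ("", 0, []) != b)).map
    (fun j => (b.2.1, (PySem.List.pyGetD bonds j ("", 0, [])).2.1))))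
  let base : List (String × String × String × List (List Int)) :=
    [("atom", "bonds", "atom",
        pvCols (bonds.map (fun b => (PySem.List.pyGetD b.2.2 0 0, PySem.List.pyGetD b.2.2 1 0)))),
     ("atom", "in", "bond", pvInside atoms bonds bidx),
     ("atom", "in", "motif", pvInside atoms motifs midx),
     ("bond", "touches", "bond", touches_bb),
     ("bond", "in", "motif", pvInside bonds motifs midx),
     -- A's touches(m1, m2) on motif tuples is vacuously true: every distinct pair links
     ("motif", "touches", "motif",
        pvCols (motifs.flatMap (fun m1 =>
          (motifs.filter (fun m2 => m2 != m1)).map (fun m2 => (m1.2.1, m2.2.1)))))]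
  if cell_vector == true then
    base ++
      [("cell", "contains", "motif",
          [List.replicate motifs.length (0 : Int), motifs.map (fun e => e.2.1)]),
       ("cell", "contains", "atom",
          [List.replicate atoms.length (0 : Int), atoms.map (fun e => e.2.1)]),
       ("cell", "contains", "bond",
          [List.replicate bonds.length (0 : Int), bonds.map (fun e => e.2.1)])]
  else base

-- ===== PRECONDITION & SPEC =====
-- Pre_ excludes exactly the inputs where the Python A raises IndexError: a hedge typed
-- "bond" whose member list has fewer than two entries (bond[2][0] / bond[2][1]).
def Pre_hetero_rel_edges (hgraph : List (String × Int × List Int)) (cell_vector : Bool) : Prop :=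
  ∀ h ∈ hgraph, h.1 = "bond" → 2 ≤ h.2.2.length
instance (hgraph : List (String × Int × List Int)) (cell_vector : Bool) : Decidable (Pre_hetero_rel_edges hgraph cell_vector) := by unfold Pre_hetero_rel_edges; infer_instance

def pvWitness_hetero_rel_edges : (List (String × Int × List Int)) × Bool :=
  ([("atom", 0, [0]), ("atom", 1, [1]), ("bond", 2, [0, 1]), ("motif", 3, [0, 1])], true)

def Spec_hetero_rel_edges (hgraph : List (String × Int × List Int)) (cell_vector : Bool) (out : List (String × String × String × List (List Int))) : Prop := out = hetero_rel_edges_alt hgraph cell_vector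
instance (hgraph : List (String × Int × List Int)) (cell_vector : Bool) (out : List (String × String × String × List (List Int))) : Decidable (Spec_hetero_rel_edges hgraph cell_vector out) := by unfold Spec_hetero_rel_edges; infer_instance

-- ===== CLAIM (what is proved, stated in full; the proofs are below) =====
def Claim_equal_hetero_rel_edges : Prop := ∀ (hgraph : List (String × Int × List Int)) (cell_vector : Bool), Dom_hetero_rel_edges hgraph cell_vector → Pre_hetero_rel_edges hgraph cell_vector → Spec_hetero_rel_edges hgraph cell_vector (hetero_rel_edges hgraph cell_vector)

-- ===== LEMMAS AND PROOFS =====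

def pvFilt (hg : List pvEnt) (s : String) : List pvEnt := hg.filter (fun h => h.1 == s)

-- the common normal form: each relation as a list of pairs, first by source then by target
def pvPairs (smalls bigs : List pvEnt) (p : pvEnt → pvEnt → Bool) : List (Int × Int) :=
  smalls.flatMap (fun s => (bigs.filter (p s)).map (fun b => (s.2.1, b.2.1)))

def pvNF (hg : List pvEnt) (cv : Bool) : List (String × String × String × List (List Int)) :=
  let atoms := pvFilt hg "atom"
  let bonds := pvFilt hg "bond"
  let motifs := pvFilt hg "motif"
  let base : List (String × String × String × List (List Int)) :=
    [("atom", "bonds", "atom",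
        [bonds.map (fun b => PySem.List.pyGetD b.2.2 0 0),
         bonds.map (fun b => PySem.List.pyGetD b.2.2 1 0)]),
     ("atom", "in", "bond",
        pvCols (pvPairs atoms bonds (fun s b => pvContains b.2.2 s.2.2))),
     ("atom", "in", "motif",
        pvCols (pvPairs atoms motifs (fun s b => pvContains b.2.2 s.2.2))),
     ("bond", "touches", "bond",
        pvCols (pvPairs bonds bonds (fun b b2 => pvTouches b.2.2 b2.2.2 && (b2 != b)))),
     ("bond", "in", "motif",
        pvCols (pvPairs bonds motifs (fun s b => pvContains b.2.2 s.2.2))),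
     ("motif", "touches", "motif",
        pvCols (pvPairs motifs motifs (fun m1 m2 => m1 != m2)))]
  if cv then
    base ++
      [("cell", "contains", "motif",
          [List.replicate motifs.length (0 : Int), motifs.map (fun e => e.2.1)]),
       ("cell", "contains", "atom",
          [List.replicate atoms.length (0 : Int), atoms.map (fun e => e.2.1)]),
       ("cell", "contains", "bond",
          [List.replicate bonds.length (0 : Int), bonds.map (fun e => e.2.1)])]
  else base

theorem pv_flatMap_congr {α β : Type} {l : List α} {f g : α → List β}
    (h : ∀ a ∈ l, f a = g a) : l.flatMap f = l.flatMap g := by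
  induction l with
  | nil => rfl
  | cons a l ih =>
    simp only [List.flatMap_cons, h a (by simp), ih fun a ha => h a (by simp [ha])]

theorem pv_ifif {γ : Type} (c1 c2 : Bool) (x y : γ) :
    (if c1 then (if c2 then x else y) else y) = (if c1 && c2 then x else y) := by
  cases c1 <;> cases c2 <;> simp

theorem pv_bne_comm {α : Type} [BEq α] [LawfulBEq α] (a b : α) : (a != b) = (b != a) := by
  simp [bne, BEq.comm]

theorem pv_pairMap {β : Type} (l : List β) (u v : β → Int) (ac : List Int × List Int) :
    l.foldl (fun ac b => (ac.1 ++ [u b], ac.2 ++ [v b])) ac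
      = (ac.1 ++ l.map u, ac.2 ++ l.map v) := by
  induction l generalizing ac with
  | nil => simp
  | cons b l ih => simp [ih]

theorem pv_ordertype_filter (hg : List pvEnt) (s : String) : pvOrdertype hg s = pvFilt hg s := by
  unfold pvOrdertype pvFilt
  rw [PySem.List.foldl_append_if_eq_filter]
  simp

theorem pv_decompose3 (hg : List pvEnt) (s1 s2 s3 : String) :
    pvDecompose hg [s1, s2, s3] = [pvOrdertype hg s1, pvOrdertype hg s2, pvOrdertype hg s3] := by
  simp [pvDecompose]

theorem pv_indexElim {α : Type} (xs : List α) (q : α → Bool) (d : α) :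
    ((PySem.List.pyRange 0 xs.length 1).filter (fun j => q (PySem.List.pyGetD xs j d))).map
        (fun j => PySem.List.pyGetD xs j d) = xs.filter q := by
  induction xs using List.reverseRecOn with
  | nil => simp [PySem.List.pyRange_one_eq_nil]
  | append_singleton xs x ih =>
    have hlen : (((xs ++ [x]).length : Nat) : Int) = (xs.length : Int) + 1 := by
      push_cast [List.length_append]; simp
    rw [hlen, PySem.List.pyRange_one_succ_right (by positivity), List.filter_append, List.map_append]
    have hg : ∀ j ∈ PySem.List.pyRange 0 (xs.length : Int) 1,
        PySem.List.pyGetD (xs ++ [x]) j d = PySem.List.pyGetD xs j d := by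
      intro j hj
      rw [PySem.List.mem_pyRange_one] at hj
      have hj2 : j < ((xs ++ [x]).length : Int) := by simp; omega
      rw [PySem.List.pyGetD_eq_getElem _ d hj.1 hj2, PySem.List.pyGetD_eq_getElem _ d hj.1 (by exact_mod_cast hj.2)]
      exact List.getElem_append_left (by omega)
    have hx : PySem.List.pyGetD (xs ++ [x]) (xs.length : Int) d = x := by
      rw [PySem.List.pyGetD_eq_getElem _ d (by positivity) (by simp)]
      simp
    rw [List.filter_congr (fun j hj => by rw [hg j hj])]
    rw [List.map_congr_left (fun j hj => hg j (List.mem_of_mem_filter hj))]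
    rw [ih, List.filter_append]
    congr 1
    rw [List.filter_singleton]
    simp only [hx]
    cases hq : q x <;> simp [hq, hx]

-- the inner loop of pvIndexOf: appending index n (all stored indices are < n) marks
-- exactly the elements of m as 'posting ends with n'
theorem pv_inner_app (m : List Int) (idx : PySem.Dict Int (List Int)) (n : Int)
    (base : Int → List Int) (done : Int → Prop) [DecidablePred done]
    (hb : ∀ e x, x ∈ base e → x < n)
    (h : ∀ e, idx.getD e [] = base e ++ (if done e then [n] else [])) :
    ∀ e, (m.foldl (fun d e =>
        d.modify e [] (fun p => if p.getLast? == some n then p else p ++ [n])) idx).getD e []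
      = base e ++ (if done e ∨ e ∈ m then [n] else []) := by
  induction m generalizing idx done with
  | nil => intro e; simp [h e]
  | cons e0 m ih =>
    intro e
    simp only [List.foldl_cons]
    have hstep : ∀ e', (idx.modify e0 []
        (fun p => if p.getLast? == some n then p else p ++ [n])).getD e' []
        = base e' ++ (if done e' ∨ e' = e0 then [n] else []) := by
      intro e'
      rw [PySem.Dict.getD_modify]
      by_cases he : e' = e0
      · subst he
        rw [if_pos rfl, h e']
        by_cases hd : done e'
        · rw [if_pos hd, if_pos (Or.inl hd)]
          simp
        · rw [if_neg hd, if_pos (Or.inr rfl), List.append_nil]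
          have : (base e').getLast? ≠ some n := by
            intro hl
            exact absurd (hb e' n (List.mem_of_getLast? hl)) (lt_irrefl n)
          simp [this]
      · rw [if_neg he, h e']
        by_cases hd : done e'
        · rw [if_pos hd, if_pos (Or.inl hd)]
        · rw [if_neg hd, if_neg (by tauto)]
    have := ih (idx.modify e0 [] (fun p => if p.getLast? == some n then p else p ++ [n]))
      (fun e' => done e' ∨ e' = e0) hstep e
    rw [this]
    congr 1
    simp only [List.mem_cons]
    by_cases h1 : done e <;> by_cases h2 : e = e0 <;> by_cases h3 : e ∈ m <;> simp [h1, h2, h3]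

theorem pv_indexOf_getD (ents : List pvEnt) :
    ∀ e : Int, (pvIndexOf ents).getD e []
      = (PySem.List.pyRange 0 ents.length 1).filter
          (fun j => (PySem.List.pyGetD ents j ("", 0, [])).2.2.contains e) := by
  induction ents using List.reverseRecOn with
  | nil => intro e; simp [pvIndexOf, PySem.List.enumerate_nil, PySem.List.pyRange_one_eq_nil]
  | append_singleton ents x ih =>
    intro e
    have hlen : (((ents ++ [x]).length : Nat) : Int) = (ents.length : Int) + 1 := by
      push_cast [List.length_append]; simp
    have hunf : pvIndexOf (ents ++ [x])
        = x.2.2.foldl (fun d e =>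
            d.modify e [] (fun p => if p.getLast? == some (ents.length : Int) then p else p ++ [(ents.length : Int)]))
            (pvIndexOf ents) := by
      unfold pvIndexOf
      rw [PySem.List.enumerate_append, List.foldl_append]
      simp [PySem.List.enumerate_cons, PySem.List.enumerate_nil]
    have hb : ∀ e' x', x' ∈ (pvIndexOf ents).getD e' [] → x' < (ents.length : Int) := by
      intro e' x' hx'
      rw [ih e'] at hx'
      have := List.mem_of_mem_filter hx'
      exact (PySem.List.mem_pyRange_one.mp this).2
    have h0 : ∀ e', (pvIndexOf ents).getD e' []
        = (pvIndexOf ents).getD e' [] ++ (if False then [(ents.length : Int)] else []) := by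
      simp
    rw [hunf, pv_inner_app x.2.2 (pvIndexOf ents) (ents.length : Int)
          (fun e' => (pvIndexOf ents).getD e' []) (fun _ => False) hb h0 e]
    rw [hlen, PySem.List.pyRange_one_succ_right (by positivity), List.filter_append]
    have hg : ∀ j ∈ PySem.List.pyRange 0 (ents.length : Int) 1,
        PySem.List.pyGetD (ents ++ [x]) j ("", 0, []) = PySem.List.pyGetD ents j ("", 0, []) := by
      intro j hj
      rw [PySem.List.mem_pyRange_one] at hj
      have hj2 : j < ((ents ++ [x]).length : Int) := by simp; omega
      rw [PySem.List.pyGetD_eq_getElem _ _ hj.1 hj2, PySem.List.pyGetD_eq_getElem _ _ hj.1 (by exact_mod_cast hj.2)]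
      exact List.getElem_append_left (by omega)
    have hx : PySem.List.pyGetD (ents ++ [x]) (ents.length : Int) ("", 0, []) = x := by
      rw [PySem.List.pyGetD_eq_getElem _ _ (by positivity) (by simp)]
      simp
    rw [List.filter_congr (fun j hj => by rw [hg j hj]), ← ih e]
    congr 1
    rw [List.filter_singleton]
    simp only [hx, false_or]
    by_cases hm : e ∈ x.2.2
    · rw [if_pos hm]; simp [hm]
    · rw [if_neg hm]; simp [hm]

theorem pv_inside_eq (smalls bigs : List pvEnt) :
    pvInside smalls bigs (pvIndexOf bigs)
      = pvCols (pvPairs smalls bigs (fun s b => pvContains b.2.2 s.2.2)) := by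
  unfold pvInside pvPairs
  congr 1
  refine pv_flatMap_congr fun s _ => ?_
  have hcand : ((match s.2.2 with
      | [] => PySem.List.pyRange 0 bigs.length 1
      | e0 :: _ => (pvIndexOf bigs).getD e0 []).filter
        (fun j => s.2.2.all (fun e => (PySem.List.pyGetD bigs j ("", 0, [])).2.2.contains e)))
      = (PySem.List.pyRange 0 bigs.length 1).filter
          (fun j => pvContains (PySem.List.pyGetD bigs j ("", 0, [])).2.2 s.2.2) := by
    cases hs : s.2.2 with
    | nil => simp [pvContains]
    | cons e0 rest =>
      show ((pvIndexOf bigs).getD e0 []).filter _ = _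
      rw [pv_indexOf_getD, List.filter_filter]
      refine List.filter_congr fun j _ => ?_
      simp only [pvContains, List.all_cons]
      cases (PySem.List.pyGetD bigs j ("", 0, [])).2.2.contains e0 <;> simp
  have h1 := pv_indexElim bigs (fun b => pvContains b.2.2 s.2.2) ("", 0, [])
  rw [hcand, ← h1, List.map_map]
  rfl

theorem pv_touches_cand (bonds : List pvEnt) (b : pvEnt) :
    PySem.List.sorted
        ((PySem.Set.ofList (b.2.2.flatMap (fun e => (pvIndexOf bonds).getD e [])) : PySem.Set Int) : List Int)
        (fun x => x)
      = (PySem.List.pyRange 0 bonds.length 1).filter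
          (fun j => pvTouches b.2.2 (PySem.List.pyGetD bonds j ("", 0, [])).2.2) := by
  apply PySem.List.sorted_eq_of_perm_of_pairwise_lt
  · rw [List.perm_ext_iff_of_nodup
      ((PySem.List.nodup_pyRange_one 0 bonds.length).filter _)
      (PySem.Set.nodup_ofList _)]
    intro j
    rw [List.mem_filter, PySem.Set.mem_ofList, List.mem_flatMap]
    simp only [pv_indexOf_getD, List.mem_filter, pvTouches, List.any_eq_true,
      List.contains_iff_mem]
    tauto
  · exact (PySem.List.pairwise_lt_pyRange_one 0 bonds.length).filter _

theorem pv_bb_eq (bonds : List pvEnt) :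
    bonds.flatMap (fun b =>
      ((PySem.List.sorted
          ((PySem.Set.ofList (b.2.2.flatMap (fun e => (pvIndexOf bonds).getD e [])) : PySem.Set Int) : List Int)
          (fun x => x)).filter
        (fun j => PySem.List.pyGetD bonds j ("", 0, []) != b)).map
      (fun j => (b.2.1, (PySem.List.pyGetD bonds j ("", 0, [])).2.1)))
    = pvPairs bonds bonds (fun b b2 => pvTouches b.2.2 b2.2.2 && (b2 != b)) := by
  unfold pvPairs
  refine pv_flatMap_congr fun b _ => ?_
  rw [pv_touches_cand, List.filter_filter]
  have hcongr : ∀ j ∈ PySem.List.pyRange 0 (bonds.length : Int) 1,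
      ((PySem.List.pyGetD bonds j ("", 0, []) != b) &&
        pvTouches b.2.2 (PySem.List.pyGetD bonds j ("", 0, [])).2.2)
      = (fun b2 => pvTouches b.2.2 b2.2.2 && (b2 != b)) (PySem.List.pyGetD bonds j ("", 0, [])) := by
    intro j _
    exact Bool.and_comm _ _
  rw [List.filter_congr hcongr]
  have h1 := pv_indexElim bonds (fun b2 => pvTouches b.2.2 b2.2.2 && (b2 != b)) ("", 0, [])
  rw [← h1, List.map_map]
  rfl

theorem pv_innerPair {β : Type} (l : List β) (p : β → Bool) (u v : β → Int)
    (ac : List Int × List Int) :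
    l.foldl (fun ac b => if p b then (ac.1 ++ [u b], ac.2 ++ [v b]) else ac) ac
      = (ac.1 ++ (l.filter p).map u, ac.2 ++ (l.filter p).map v) := by
  induction l generalizing ac with
  | nil => simp
  | cons b l ih =>
    simp only [List.foldl_cons, List.filter_cons]
    cases hp : p b with
    | false => simp [ih]
    | true => simp [ih]

theorem pv_outerPair {α : Type} (l : List α) (F G : α → List Int) (ac : List Int × List Int) :
    l.foldl (fun ac a => (ac.1 ++ F a, ac.2 ++ G a)) ac
      = (ac.1 ++ l.flatMap F, ac.2 ++ l.flatMap G) := by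
  induction l generalizing ac with
  | nil => simp
  | cons a l ih => simp [ih]

theorem pv_cols_pairs (smalls bigs : List pvEnt) (p : pvEnt → pvEnt → Bool) :
    pvCols (pvPairs smalls bigs p)
      = [smalls.flatMap (fun s => (bigs.filter (p s)).map (fun _ => s.2.1)),
         smalls.flatMap (fun s => (bigs.filter (p s)).map (fun b => b.2.1))] := by
  simp [pvCols, pvPairs, List.map_flatMap, List.map_map, Function.comp_def, List.map_const']

theorem pv_bb_pred (b1 b2 : pvEnt) :
    ((b1 != b2) && pvTouches b1.2.2 b2.2.2) = (pvTouches b1.2.2 b2.2.2 && (b2 != b1)) := by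
  rw [Bool.and_comm, pv_bne_comm]

theorem pv_cols_map (l : List pvEnt) (u v : pvEnt → Int) :
    pvCols (l.map (fun b => (u b, v b))) = [l.map u, l.map v] := by
  simp [pvCols, List.map_map, Function.comp_def]

theorem pv_mm_filter (hg : List pvEnt) (m1 : pvEnt) (h1 : m1 ∈ pvFilt hg "motif") :
    (pvFilt hg "motif").filter (fun m2 => (m1 != m2) && pvTouchesT m1 m2)
      = (pvFilt hg "motif").filter (fun m2 => m1 != m2) := by
  refine List.filter_congr fun m2 h2 => ?_
  have e1 : m1.1 = "motif" := by simpa using (List.mem_filter.mp h1).2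
  have e2 : m2.1 = "motif" := by simpa using (List.mem_filter.mp h2).2
  simp [pvTouchesT, e1, e2]

theorem pv_A_eq (hg : List pvEnt) (cv : Bool) : hetero_rel_edges hg cv = pvNF hg cv := by
  unfold hetero_rel_edges pvNF
  rw [pv_decompose3, pv_decompose3]
  simp only [pv_ordertype_filter]
  simp only [pv_ifif, pv_bb_pred, pv_innerPair, pv_pairMap, pv_outerPair, List.nil_append,
    List.map_const', List.zip, List.zipWith, List.foldl_cons, List.foldl_nil,
    pv_cols_pairs]
  have hmm1 : List.flatMap (fun a =>
        List.replicate (List.filter (fun b => a != b && pvTouchesT a b) (pvFilt hg "motif")).length a.2.1)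
        (pvFilt hg "motif")
      = List.flatMap (fun a =>
        List.replicate (List.filter (fun b => a != b) (pvFilt hg "motif")).length a.2.1)
        (pvFilt hg "motif") :=
    pv_flatMap_congr (fun a ha => by rw [pv_mm_filter hg a ha])
  have hmm2 : List.flatMap (fun a =>
        List.map (fun b => b.2.1) (List.filter (fun b => a != b && pvTouchesT a b) (pvFilt hg "motif")))
        (pvFilt hg "motif")
      = List.flatMap (fun a =>
        List.map (fun b => b.2.1) (List.filter (fun b => a != b) (pvFilt hg "motif")))
        (pvFilt hg "motif") :=
    pv_flatMap_congr (fun a ha => by rw [pv_mm_filter hg a ha])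
  rw [hmm1, hmm2]
  cases cv <;>
    simp [PySem.Dict.items_insert, PySem.Dict.contains_insert, PySem.Dict.empty, pvFilt]

theorem pv_B_eq (hg : List pvEnt) (cv : Bool) : hetero_rel_edges_alt hg cv = pvNF hg cv := by
  have hmm : ∀ ms : List pvEnt,
      ms.flatMap (fun m1 => (ms.filter (fun m2 => m2 != m1)).map (fun m2 => (m1.2.1, m2.2.1)))
        = pvPairs ms ms (fun m1 m2 => m1 != m2) := fun ms =>
    pv_flatMap_congr (fun a _ => by rw [List.filter_congr (fun b _ => pv_bne_comm b a)])
  simp only [hetero_rel_edges_alt, pvNF, pvFilt, pv_inside_eq, pv_bb_eq, hmm,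
    pv_cols_pairs, pv_cols_map]
  cases cv <;> rfl

-- ===== VERDICT (by name: the statement is the Claim_ definition above) =====
theorem hetero_rel_edges_spec : Claim_equal_hetero_rel_edges := by
  intro hg cv _ _
  unfold Spec_hetero_rel_edges
  exact (pv_A_eq hg cv).trans (pv_B_eq hg cv).symm
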